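-- pv_equiv track=rewrite | github.com/yuxu42/openvino-skills | skills/track-ov-contributors/generate_contributors.py | bucket_by_month
-- ===== SOURCE A (Python) =====
-- def bucket_by_month(items, month_range):
--     """Bucket PR items into month counts."""
--     counts = {label: 0 for _, label in month_range}
--     prefix_to_label = {prefix: label for prefix, label in month_range}
--     for item in items:
--         ym = item["created_at"][:7]
--         if ym in prefix_to_label:
--             counts[prefix_to_label[ym]] += 1
--     return counts
-- ===== SOURCE B (Python) =====
-- def bucket_by_month(items, month_range):
--     """Bucket PR items into month counts."""
--     # Count every raw year-month once, then pull per-bucket totals.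
--     ym_counts = {}
--     for item in items:
--         ym = item["created_at"][:7]
--         ym_counts[ym] = ym_counts.get(ym, 0) + 1
--     prefix_to_label = dict(month_range)
--     counts = {label: 0 for _, label in month_range}
--     for prefix, label in prefix_to_label.items():
--         counts[label] += ym_counts.get(prefix, 0)
--     return counts
-- ===== Notes on version B (the rewrite author's own statement) =====
-- stated objective: alternative
-- what changed: Instead of testing each item against the prefix dict and incrementing its bucket, B first tallies all raw year-month prefixes into one dict in a single pass and then walks the deduplicated prefix->label map once, pulling each bucket's total from that tally.
import Mathlib
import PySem

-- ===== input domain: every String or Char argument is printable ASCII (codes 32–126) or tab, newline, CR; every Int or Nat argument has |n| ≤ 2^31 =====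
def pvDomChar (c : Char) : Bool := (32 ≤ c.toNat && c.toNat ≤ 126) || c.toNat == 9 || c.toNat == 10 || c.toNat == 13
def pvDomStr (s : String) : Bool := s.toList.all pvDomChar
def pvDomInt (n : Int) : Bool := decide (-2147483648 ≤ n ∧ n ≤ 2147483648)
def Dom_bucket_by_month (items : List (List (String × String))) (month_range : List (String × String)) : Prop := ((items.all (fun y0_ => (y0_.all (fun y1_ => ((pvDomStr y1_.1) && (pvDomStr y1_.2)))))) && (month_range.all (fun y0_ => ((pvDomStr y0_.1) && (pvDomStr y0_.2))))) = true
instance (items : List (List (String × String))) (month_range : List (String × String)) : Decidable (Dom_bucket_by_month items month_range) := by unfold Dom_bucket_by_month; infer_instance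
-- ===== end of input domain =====

-- B tallies all year-month prefixes into one dict first, then pulls per-bucket totals from it;
-- A increments the bucket of each item individually. Same cost class, different traversal.

-- item["created_at"][:7] (both Pythons compute this the same way; under Pre_ the key is present)
def pvYm (item : List (String × String)) : String :=
  PySem.Str.slice ((PySem.Dict.ofList item).getD "created_at" "") none (some 7)

-- ===== PORT A =====
def bucket_by_month (items : List (List (String × String))) (month_range : List (String × String)) : List (String × Int) :=
  let counts : PySem.Dict String Int :=
    month_range.foldl (fun d p => d.insert p.2 0) PySem.Dict.empty
  let prefix_to_label : PySem.Dict String String :=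
    month_range.foldl (fun d p => d.insert p.1 p.2) PySem.Dict.empty
  let final := items.foldl (fun d item =>
    let ym := pvYm item
    if prefix_to_label.contains ym then d.modify (prefix_to_label.getD ym "") 0 (· + 1) else d) counts
  final.items

-- ===== PORT B =====
def bucket_by_month_alt (items : List (List (String × String))) (month_range : List (String × String)) : List (String × Int) :=
  let ym_counts : PySem.Dict String Int :=
    items.foldl (fun d item =>
      let ym := pvYm item
      d.insert ym (d.getD ym 0 + 1)) PySem.Dict.empty
  let prefix_to_label : PySem.Dict String String := PySem.Dict.ofList month_range
  let counts : PySem.Dict String Int :=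
    month_range.foldl (fun d p => d.insert p.2 0) PySem.Dict.empty
  let final := prefix_to_label.items.foldl
    (fun d pl => d.modify pl.2 0 (· + ym_counts.getD pl.1 0)) counts
  final.items

-- ===== PRECONDITION & SPEC =====
-- Pre_ excludes exactly the items without a "created_at" key, on which Python A raises KeyError.
def Pre_bucket_by_month (items : List (List (String × String))) (month_range : List (String × String)) : Prop :=
  ∀ item ∈ items, "created_at" ∈ item.map Prod.fst
instance (items : List (List (String × String))) (month_range : List (String × String)) : Decidable (Pre_bucket_by_month items month_range) := by unfold Pre_bucket_by_month; infer_instance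
def pvWitness_bucket_by_month : (List (List (String × String))) × (List (String × String)) :=
  ([[("created_at", "2024-01-05T00:00:00Z")], [("created_at", "2024-02-11")]],
   [("2024-01", "Jan 2024"), ("2024-02", "Feb 2024")])
def Spec_bucket_by_month (items : List (List (String × String))) (month_range : List (String × String)) (out : List (String × Int)) : Prop := out = bucket_by_month_alt items month_range
instance (items : List (List (String × String))) (month_range : List (String × String)) (out : List (String × Int)) : Decidable (Spec_bucket_by_month items month_range out) := by unfold Spec_bucket_by_month; infer_instance

-- ===== CLAIM (what is proved, stated in full; the proofs are below) =====
def Claim_equal_bucket_by_month : Prop := ∀ (items : List (List (String × String))) (month_range : List (String × String)), Dom_bucket_by_month items month_range → Pre_bucket_by_month items month_range → Spec_bucket_by_month items month_range (bucket_by_month items month_range)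

-- ===== LEMMAS AND PROOFS =====

-- A's loop, read on the list of year-months: getD at any key
theorem pv_A_getD (p2l : PySem.Dict String String) (yms : List String)
    (d : PySem.Dict String Int) (k : String) :
    (yms.foldl (fun d ym => if p2l.contains ym then d.modify (p2l.getD ym "") 0 (· + 1) else d) d).getD k 0
      = d.getD k 0 + (yms.countP (fun ym => p2l.contains ym && (p2l.getD ym "" == k)) : Int) := by
  induction yms generalizing d with
  | nil => simp
  | cons y ys ih =>
    simp only [List.foldl_cons, List.countP_cons]
    by_cases hc : p2l.contains y = true
    · rw [if_pos hc, ih, PySem.Dict.getD_modify]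
      by_cases hk : k = p2l.getD y ""
      · rw [if_pos hk, ← hk]
        have hb : (p2l.contains y && (k == k)) = true := by simp [hc]
        rw [hb, if_pos rfl]; push_cast; ring
      · rw [if_neg hk]
        have hb : (p2l.contains y && (p2l.getD y "" == k)) = false := by
          simp; exact fun _ h => hk h.symm
        rw [hb]; simp
    · rw [if_neg hc, ih]
      have hb : (p2l.contains y && (p2l.getD y "" == k)) = false := by simp [hc]
      rw [hb]; simp

theorem pv_A_keys (p2l : PySem.Dict String String) (yms : List String)
    (d : PySem.Dict String Int)
    (h : ∀ ym, p2l.contains ym = true → p2l.getD ym "" ∈ d.keys) :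
    (yms.foldl (fun d ym => if p2l.contains ym then d.modify (p2l.getD ym "") 0 (· + 1) else d) d).keys
      = d.keys := by
  induction yms generalizing d with
  | nil => rfl
  | cons y ys ih =>
    simp only [List.foldl_cons]
    by_cases hc : p2l.contains y = true
    · rw [if_pos hc]
      have hk : (d.modify (p2l.getD y "") 0 (· + 1)).keys = d.keys := by
        rw [PySem.Dict.keys_modify, PySem.Dict.keys_insert_of_contains]
        rw [PySem.Dict.contains_iff_mem_keys]
        exact h _ hc
      rw [ih _ (fun ym hm => hk ▸ h ym hm), hk]
    · rw [if_neg hc]; exact ih _ h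

-- B's pulling loop: getD at any key
theorem pv_B_getD (w : String → Int) (pairs : List (String × String))
    (d : PySem.Dict String Int) (k : String) :
    (pairs.foldl (fun d pl => d.modify pl.2 0 (· + w pl.1)) d).getD k 0
      = d.getD k 0 + ((pairs.filter (fun pl => pl.2 == k)).map (fun pl => w pl.1)).sum := by
  induction pairs generalizing d with
  | nil => simp
  | cons p ps ih =>
    simp only [List.foldl_cons, List.filter_cons, ih]
    by_cases hk : (p.2 == k) = true
    · rw [if_pos hk, PySem.Dict.getD_modify, if_pos (eq_of_beq hk).symm]
      simp only [List.map_cons, List.sum_cons, eq_of_beq hk]; ring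
    · have hne : ¬ (k = p.2) := fun h => by simp [h] at hk
      rw [if_neg hk, PySem.Dict.getD_modify, if_neg hne]
  
theorem pv_B_keys (w : String → Int) (pairs : List (String × String))
    (d : PySem.Dict String Int)
    (h : ∀ pl ∈ pairs, pl.2 ∈ d.keys) :
    (pairs.foldl (fun d pl => d.modify pl.2 0 (· + w pl.1)) d).keys = d.keys := by
  induction pairs generalizing d with
  | nil => rfl
  | cons p ps ih =>
    simp only [List.foldl_cons]
    have hk : (d.modify p.2 0 (· + w p.1)).keys = d.keys := by
      rw [PySem.Dict.keys_modify, PySem.Dict.keys_insert_of_contains]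
      rw [PySem.Dict.contains_iff_mem_keys]
      exact h p (by simp)
    rw [ih _ (fun pl hm => hk ▸ h pl (by simp [hm])), hk]

-- counting a list against a duplicate-free reference list
theorem pv_sum_ind (y : String) (L : List String) (hnd : L.Nodup) :
    (L.map (fun x => if y == x then 1 else 0)).sum = if y ∈ L then 1 else 0 := by
  induction L with
  | nil => simp
  | cons a as ih =>
    rcases List.nodup_cons.1 hnd with ⟨ha, has⟩
    simp only [List.map_cons, List.sum_cons, ih has, List.mem_cons]
    by_cases h : y = a
    · subst h; simp [ha]
    · simp [h]

theorem pv_countP_mem (yms L : List String) (hnd : L.Nodup) :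
    yms.countP (fun y => decide (y ∈ L)) = (L.map (fun x => yms.count x)).sum := by
  induction yms with
  | nil => simp
  | cons y ys ih =>
    have hc : ∀ x, (y :: ys).count x = ys.count x + (if y == x then 1 else 0) := by
      intro x; rw [List.count_cons]
    simp only [List.countP_cons, ih]
    rw [List.map_congr_left (fun x _ => hc x), List.sum_map_add, pv_sum_ind y L hnd]
    by_cases hy : y ∈ L <;> simp [hy]

-- values of the prefix_to_label fold come from month_range's labels
theorem pv_values_sub (mr : List (String × String)) (d : PySem.Dict String String)
    (v : String) (h : v ∈ (mr.foldl (fun d p => d.insert p.1 p.2) d).values) :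
    v ∈ d.values ∨ v ∈ mr.map Prod.snd := by
  induction mr generalizing d with
  | nil => exact Or.inl h
  | cons p ps ih =>
    rcases ih _ h with h' | h'
    · rcases PySem.Dict.mem_values_insert _ _ _ _ h' with h'' | h''
      · exact Or.inr (by simp [h''])
      · exact Or.inl h''
    · exact Or.inr (by simp [h'])

-- ===== VERDICT (by name: the statement is the Claim_ definition above) =====
theorem bucket_by_month_spec : Claim_equal_bucket_by_month := by
  intro items month_range _dom _pre
  unfold Spec_bucket_by_month bucket_by_month bucket_by_month_alt
  set p2l : PySem.Dict String String :=
    month_range.foldl (fun d p => d.insert p.1 p.2) PySem.Dict.empty with hp2l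
  have hofl : PySem.Dict.ofList month_range = p2l := rfl
  set counts0 : PySem.Dict String Int :=
    month_range.foldl (fun d p => d.insert p.2 0) PySem.Dict.empty with hc0
  -- keys of counts0 are the (deduplicated) labels; nodup
  have hnd0 : counts0.keys.Nodup := by
    rw [hc0]
    exact PySem.Dict.nodup_keys_foldl_insert_key month_range (fun p => p.2) _ _ (by simp [PySem.Dict.keys_empty])
  have hkeys0 : counts0.keys = PySem.Set.ofList (month_range.map Prod.snd) := by
    rw [hc0, PySem.Dict.keys_foldl_insert_key month_range (fun p => p.2) (fun _ _ => 0) PySem.Dict.empty]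
    simp [PySem.Dict.keys_empty, PySem.Set.update_nil_left]
  have hndp : p2l.keys.Nodup := hofl ▸ PySem.Dict.nodup_keys_ofList month_range
  -- every label a modify touches is already a key of counts0
  have hval : ∀ v, v ∈ p2l.values → v ∈ counts0.keys := by
    intro v hv
    rcases pv_values_sub month_range PySem.Dict.empty v hv with h | h
    · simp [PySem.Dict.values, PySem.Dict.empty] at h
    · rw [hkeys0]; exact (PySem.Set.mem_ofList _ _).2 h
  have hA : ∀ ym, p2l.contains ym = true → p2l.getD ym "" ∈ counts0.keys := by
    intro ym hc
    have : ∃ v, p2l.get? ym = some v := by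
      rcases h : p2l.get? ym with _ | v
      · rw [PySem.Dict.contains_eq_isSome_get?, h] at hc; simp at hc
      · exact ⟨v, rfl⟩
    rcases this with ⟨v, hv⟩
    have hgd : p2l.getD ym "" = v := PySem.Dict.getD_of_get?_eq_some _ _ hv
    have hmem : (ym, v) ∈ p2l.items := PySem.Dict.mem_items_of_get?_eq_some _ hv
    have : v ∈ p2l.values := by
      have := List.mem_map_of_mem (f := Prod.snd) hmem
      simpa [PySem.Dict.values] using this
    rw [hgd]; exact hval v this
  have hB : ∀ pl ∈ p2l.items, pl.2 ∈ counts0.keys := by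
    intro pl hm
    apply hval
    have := List.mem_map_of_mem (f := Prod.snd) hm
    simpa [PySem.Dict.values] using this
  -- rewrite A's item loop as a loop over year-months
  have hAfold : items.foldl (fun d item =>
      let ym := pvYm item
      if p2l.contains ym then d.modify (p2l.getD ym "") 0 (· + 1) else d) counts0
      = (items.map pvYm).foldl (fun d ym => if p2l.contains ym then d.modify (p2l.getD ym "") 0 (· + 1) else d) counts0 := by
    rw [List.foldl_map]
  -- rewrite B's tally loop as a counter
  have hBcnt : items.foldl (fun d item =>
      let ym := pvYm item
      d.insert ym (d.getD ym 0 + 1)) PySem.Dict.empty = PySem.Dict.counter (items.map pvYm) := by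
    rw [← PySem.Dict.foldl_insert_getD_add_one_eq_counter, List.foldl_map]
  simp only [hofl, hAfold, hBcnt]
  set yms := items.map pvYm with hyms
  set dA := yms.foldl (fun d ym => if p2l.contains ym then d.modify (p2l.getD ym "") 0 (· + 1) else d) counts0 with hdA
  set dB := p2l.items.foldl (fun d pl => d.modify pl.2 0 (· + (PySem.Dict.counter yms).getD pl.1 0)) counts0 with hdB
  -- keys agree
  have hKA : dA.keys = counts0.keys := pv_A_keys p2l yms counts0 hA
  have hKB : dB.keys = counts0.keys := by
    rw [hdB]; exact pv_B_keys (fun pre => (PySem.Dict.counter yms).getD pre 0) p2l.items counts0 hB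
  -- getD agrees at every key
  have hget : ∀ k, dA.getD k 0 = dB.getD k 0 := by
    intro k
    rw [hdA, hdB, pv_A_getD, pv_B_getD (fun pre => (PySem.Dict.counter yms).getD pre 0) p2l.items counts0 k]
    congr 1
    -- A's predicate is membership in the prefixes mapping to k
    set L := (p2l.items.filter (fun pl => pl.2 == k)).map Prod.fst with hL
    have hLnd : L.Nodup := by
      rw [hL]
      exact (List.Sublist.map Prod.fst List.filter_sublist).nodup hndp
    have hpred : ∀ ym, (p2l.contains ym && (p2l.getD ym "" == k)) = decide (ym ∈ L) := by
      intro ym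
      by_cases hm : ym ∈ L
      · rcases List.mem_map.1 (hL ▸ hm) with ⟨pl, hpl, hfst⟩
        rcases List.mem_filter.1 hpl with ⟨hpi, hsnd⟩
        have hk2 : pl.2 = k := eq_of_beq hsnd
        have hget? : p2l.get? ym = some k := by
          have : p2l.get? pl.1 = some pl.2 := PySem.Dict.get?_of_mem_items _ (by rw [← Prod.mk.eta (p := pl)] at hpi; exact hpi) hndp
          rw [← hfst, this, hk2]
        have hcont : p2l.contains ym = true := by
          rw [PySem.Dict.contains_eq_isSome_get?, hget?]; rfl
        have hgd : p2l.getD ym "" = k := PySem.Dict.getD_of_get?_eq_some _ _ hget?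
        simp [hcont, hgd, hm]
      · simp only [decide_eq_false hm]
        by_cases hc : p2l.contains ym = true
        · rcases h : p2l.get? ym with _ | v
          · rw [PySem.Dict.contains_eq_isSome_get?, h] at hc; simp at hc
          · have hgd : p2l.getD ym "" = v := PySem.Dict.getD_of_get?_eq_some _ _ h
            have hvne : v ≠ k := by
              intro hvk
              apply hm
              rw [hL]
              apply List.mem_map.2
              refine ⟨(ym, v), List.mem_filter.2 ⟨PySem.Dict.mem_items_of_get?_eq_some _ h, by simp [hvk]⟩, rfl⟩
            simp [hc, hgd, hvne]
        · simp [hc]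
    have hcgr : yms.countP (fun ym => p2l.contains ym && (p2l.getD ym "" == k)) = yms.countP (fun y => decide (y ∈ L)) := by
      apply List.countP_congr; intro x _; rw [hpred x]
    rw [hcgr, pv_countP_mem yms L hLnd, Nat.cast_list_sum, List.map_map, hL, List.map_map]
    congr 1
    apply List.map_congr_left
    intro pl _
    simp [Function.comp, PySem.Dict.getD_counter]
  -- conclude items equality
  rw [PySem.Dict.items_eq_map_keys dA (hKA ▸ hnd0) 0, PySem.Dict.items_eq_map_keys dB (hKB ▸ hnd0) 0, hKA, hKB]
  apply List.map_congr_left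
  intro k _
  rw [hget k]
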